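-- pv_equiv track=rewrite | github.com/nshaganti/advent-of-code-2025 | day_01.py | part_1
-- ===== SOURCE A (Python) =====
-- def part_1(instructions: list[tuple[str, int]], start_pos: int = 50) -> int:
--     """
--     Counts how many times the dial lands EXACTLY on 0 after a rotation.
--
--     Logic:
--         We track the position on a cyclic dial of size 100 (0-99).
--         We use modular arithmetic to update the position:
--         new_pos = (current_pos + displacement) % 100.
--         Python's % operator handles negative numbers correctly (e.g., -10 % 100 = 90).
--
--     Complexity:
--         Time:  O(N) - We iterate through the list of N instructions once.
--         Space: O(1) - We use a constant amount of extra memory.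
--     """
--     zero_hits = 0
--     current_pos = start_pos
--
--     for direction, moves in instructions:
--         sign = -1 if direction == 'L' else 1
--         current_pos = (current_pos + (sign * moves)) % 100
--
--         if current_pos == 0:
--             zero_hits += 1
--
--     return zero_hits
-- ===== SOURCE B (Python) =====
-- def part_1(instructions: list[tuple[str, int]], start_pos: int = 50) -> int:
--     """Divide and conquer: a range of instructions is summarised by the pair
--     (zero hits inside the range given its entry position, total signed
--     displacement of the range); halves are solved recursively and combined."""
--     def solve(lo, hi, pos):
--         n = hi - lo
--         if n == 0:
--             return 0, 0
--         if n == 1: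
--             d, m = instructions[lo]
--             s = -m if d == 'L' else m
--             return (1 if (pos + s) % 100 == 0 else 0), s
--         mid = lo + n // 2
--         h1, s1 = solve(lo, mid, pos)
--         h2, s2 = solve(mid, hi, pos + s1)
--         return h1 + h2, s1 + s2
--     return solve(0, len(instructions), start_pos)[0]
-- ===== Notes on version B (the rewrite author's own statement) =====
-- stated objective: alternative
-- what changed: Replaced A's single stateful left-to-right modular scan by a divide-and-conquer recursion: each half-range is summarised by (zero-hit count given entry position, total displacement) and the two summaries are combined; correctness rests on displacement sums composing and the %100 test only needing the raw running total.
import Mathlib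
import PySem

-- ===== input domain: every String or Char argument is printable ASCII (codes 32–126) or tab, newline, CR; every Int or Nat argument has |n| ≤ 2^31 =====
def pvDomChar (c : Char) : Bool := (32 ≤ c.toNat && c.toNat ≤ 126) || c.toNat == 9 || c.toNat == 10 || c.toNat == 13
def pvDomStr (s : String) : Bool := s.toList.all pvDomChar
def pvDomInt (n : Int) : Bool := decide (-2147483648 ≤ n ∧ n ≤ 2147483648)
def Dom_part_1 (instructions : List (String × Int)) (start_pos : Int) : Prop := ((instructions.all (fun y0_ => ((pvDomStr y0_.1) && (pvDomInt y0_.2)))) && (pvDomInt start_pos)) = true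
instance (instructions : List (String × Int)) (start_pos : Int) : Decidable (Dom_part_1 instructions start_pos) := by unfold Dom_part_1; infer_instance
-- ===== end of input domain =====

-- B replaces A's stateful left-to-right modular scan with a divide-and-conquer recursion
-- that summarises each half-range by (zero-hit count, total displacement) and combines them.


-- ===== PORT A =====
-- loop body of A: state = (zero_hits, current_pos)
def pvStepA (st : Int × Int) (dm : String × Int) : Int × Int :=
  let sign : Int := if dm.1 == "L" then -1 else 1
  let current_pos := PySem.Int.mod (st.2 + sign * dm.2) 100
  (if current_pos == 0 then st.1 + 1 else st.1, current_pos)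

def part_1 (instructions : List (String × Int)) (start_pos : Int) : Int :=
  (instructions.foldl pvStepA (0, start_pos)).1

-- ===== PORT B =====
-- B's recursive helper 'solve': the index range instructions[lo:hi] is realised as a
-- sublist (take/drop), mid = lo + n // 2 becomes splitting at length / 2.
def pvSolve (xs : List (String × Int)) (pos : Int) : Int × Int :=
  match xs with
  | [] => (0, 0)
  | (d, m) :: rest =>
    if rest.length = 0 then
      let s := if d == "L" then -m else m
      ((if PySem.Int.mod (pos + s) 100 == 0 then 1 else 0), s)
    else
      let mid := ((d, m) :: rest).length / 2
      let r1 := pvSolve (((d, m) :: rest).take mid) pos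
      let r2 := pvSolve (((d, m) :: rest).drop mid) (pos + r1.2)
      (r1.1 + r2.1, r1.2 + r2.2)
termination_by xs.length
decreasing_by
  · simp [List.length_take]; omega
  · simp; omega

def part_1_alt (instructions : List (String × Int)) (start_pos : Int) : Int :=
  (pvSolve instructions start_pos).1

-- ===== PRECONDITION & SPEC =====
def Spec_part_1 (instructions : List (String × Int)) (start_pos : Int) (out : Int) : Prop := out = part_1_alt instructions start_pos
instance (instructions : List (String × Int)) (start_pos : Int) (out : Int) : Decidable (Spec_part_1 instructions start_pos out) := by unfold Spec_part_1; infer_instance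

-- ===== CLAIM (what is proved, stated in full; the proofs are below) =====
def Claim_equal_part_1 : Prop := ∀ (instructions : List (String × Int)) (start_pos : Int), Dom_part_1 instructions start_pos → Spec_part_1 instructions start_pos (part_1 instructions start_pos)

-- ===== LEMMAS AND PROOFS =====

-- Reference linear zero-hit count over raw running totals, and total displacement.
def pvLin (xs : List (String × Int)) (t : Int) : Int :=
  match xs with
  | [] => 0
  | (d, m) :: rest =>
      let t' := t + (if d == "L" then -m else m)
      (if t' % 100 = 0 then 1 else 0) + pvLin rest t'

def pvDisp (xs : List (String × Int)) : Int :=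
  (xs.map (fun dm => if dm.1 == "L" then -dm.2 else dm.2)).sum

theorem pv_mod100 (a : Int) : PySem.Int.mod a 100 = a % 100 :=
  PySem.Int.mod_eq_emod_of_pos (by norm_num)

theorem pvDisp_append (l r : List (String × Int)) : pvDisp (l ++ r) = pvDisp l + pvDisp r := by
  simp [pvDisp]

theorem pvLin_append (l r : List (String × Int)) (t : Int) :
    pvLin (l ++ r) t = pvLin l t + pvLin r (t + pvDisp l) := by
  induction l generalizing t with
  | nil => simp [pvLin, pvDisp]
  | cons dm rest ih =>
      obtain ⟨d, m⟩ := dm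
      simp only [List.cons_append, pvLin, pvDisp, List.map_cons, List.sum_cons, ih]
      ring_nf

-- B's divide-and-conquer computes exactly (linear count, total displacement).
theorem pvSolve_eq (xs : List (String × Int)) (pos : Int) :
    pvSolve xs pos = (pvLin xs pos, pvDisp xs) := by
  fun_induction pvSolve xs pos with
  | case1 => simp [pvLin, pvDisp]
  | case2 pos d m rest h s =>
      have : rest = [] := List.length_eq_zero_iff.mp h
      subst this
      simp [pvLin, pvDisp, s]
  | case3 pos d m rest h mid r1 r2 ihTake ihTake2 ihDrop =>
      have hsplit : ((d, m) :: rest).take mid ++ ((d, m) :: rest).drop mid = (d, m) :: rest :=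
        List.take_append_drop mid _
      have hl := pvLin_append (((d, m) :: rest).take mid) (((d, m) :: rest).drop mid) pos
      have hd := pvDisp_append (((d, m) :: rest).take mid) (((d, m) :: rest).drop mid)
      rw [hsplit] at hl hd
      simp only [r1, r2, ihTake] at ihDrop ⊢
      clear ihTake2
      rw [ihDrop, hl, hd]

-- A's fold agrees with the linear count whenever its position p matches the raw total t mod 100.
theorem pv_loop_eq (xs : List (String × Int)) :
    ∀ (acc p t : Int), p % 100 = t % 100 →
    (xs.foldl pvStepA (acc, p)).1 = acc + pvLin xs t := by
  induction xs with
  | nil => intro acc p t _; simp [pvLin]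
  | cons dm rest ih =>
      intro acc p t h
      obtain ⟨d, m⟩ := dm
      have hs : (if (d == "L") = true then (-1:Int) else 1) * m
              = (if (d == "L") = true then -m else m) := by
        by_cases hL : (d == "L") = true <;> simp [hL]
      have hpt : ∀ s : Int, (p + s) % 100 = (t + s) % 100 := by intro s; omega
      have hstep : pvStepA (acc, p) (d, m)
          = (if (t + (if (d == "L") = true then -m else m)) % 100 == 0 then acc + 1 else acc,
             (t + (if (d == "L") = true then -m else m)) % 100) := by
        simp only [pvStepA, pv_mod100, hs, hpt]
      rw [List.foldl_cons, hstep]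
      simp only [pvLin]
      generalize (t + (if (d == "L") = true then -m else m)) = u
      rw [ih (if (u % 100 == 0) = true then acc + 1 else acc) (u % 100) u (by omega)]
      by_cases hz : u % 100 = 0
      · simp [hz]; ring
      · have hb : (u % 100 == 0) = false := by simpa using hz
        simp [hb, hz]

-- ===== VERDICT (by name: the statement is the Claim_ definition above) =====
theorem part_1_spec : Claim_equal_part_1 := by
  intro instructions start_pos _
  unfold Spec_part_1 part_1 part_1_alt
  rw [pvSolve_eq, pv_loop_eq instructions 0 start_pos start_pos rfl]
  ring
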